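-- pv_equiv track=rewrite | github.com/Chucooleg/UW_Algorithms_and_Data_Structures_1 | Lesson3_EnumerateSubsets.py | generate_one_subset_from_bit_pattern
-- ===== SOURCE A (Python) =====
-- def generate_one_subset_from_bit_pattern(value, str_parameter):
--     number_of_bits_in_int = 32
--     num_bits_to_check = min(number_of_bits_in_int, len(str_parameter))
--     subset_str = ""
--
--     for i in range (num_bits_to_check):
--         # Check if the ith bit of value is 1:
--         # We do this by left shifting 0x1 (which is bit pattern 01) by i places.
--         # this puts the 1 in the 0x1 at the ith position.
--         # And when we do a bit and with value, it tells if the ith bit in value is 1 or 0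
--         bit_pattern_with_ith_but_as_1 = 0x1 << i # Left shift 01 by i positions
--         ith_bit_value = value & bit_pattern_with_ith_but_as_1
--
--         if ith_bit_value != 0:
--             subset_str = subset_str + str_parameter[i] # take ith char of str
--
--     return subset_str
-- ===== SOURCE B (Python) =====
-- def generate_one_subset_from_bit_pattern(value, str_parameter):
--     n = min(32, len(str_parameter))
--     masked = value & ((1 << n) - 1)   # the low n bits of value (two's complement)
--     chars = []
--     while masked:                      # visit only the set bits, lowest first
--         rest = masked & (masked - 1)   # masked with its lowest set bit cleared
--         low = masked - rest            # the lowest set bit, a power of two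
--         chars.append(str_parameter[low.bit_length() - 1])
--         masked = rest
--     return ''.join(chars)
-- ===== Notes on version B (the rewrite author's own statement) =====
-- stated objective: alternative
-- what changed: B masks value to its low min(32, len) bits once and then iterates only over the set bits of the mask by lowest-set-bit extraction (masked & (masked-1) / bit_length), collecting chars into a list joined at the end, instead of A's scan of every bit position with a fresh 1<<i test and string concatenation.
import Mathlib
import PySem

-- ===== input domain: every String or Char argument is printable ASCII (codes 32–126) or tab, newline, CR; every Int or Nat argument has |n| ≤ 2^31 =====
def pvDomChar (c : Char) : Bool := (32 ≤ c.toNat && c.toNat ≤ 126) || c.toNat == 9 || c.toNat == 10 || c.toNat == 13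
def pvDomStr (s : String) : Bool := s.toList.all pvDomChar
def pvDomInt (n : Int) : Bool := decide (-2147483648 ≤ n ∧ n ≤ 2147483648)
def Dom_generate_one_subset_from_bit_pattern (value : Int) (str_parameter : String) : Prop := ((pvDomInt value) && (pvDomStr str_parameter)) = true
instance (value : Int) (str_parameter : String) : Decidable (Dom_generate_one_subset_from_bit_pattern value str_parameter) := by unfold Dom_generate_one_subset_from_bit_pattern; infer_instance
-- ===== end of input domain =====

-- B iterates over only the SET bits of the masked value (lowest-set-bit extraction) instead of
-- scanning all 32 bit positions; same return value on every input (alternative algorithm).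

-- ===== PORT A =====
-- A's subset_str (a Python string built by +) is carried as a List Char and converted by
-- String.mk at the end (PySem convention: string facts live on List Char).
-- str_parameter[i] is cs.getD i: 0 ≤ i < num_bits_to_check ≤ len always, so no IndexError.
def generate_one_subset_from_bit_pattern (value : Int) (str_parameter : String) : String :=
  let number_of_bits_in_int : Int := 32
  let num_bits_to_check : Int := min number_of_bits_in_int (PySem.Str.len str_parameter)
  let cs := str_parameter.toList
  String.ofList <|
    (PySem.List.pyRange 0 num_bits_to_check 1).foldl (fun subset_str i =>
      let bit_pattern_with_ith_bit_as_1 : Int := 1 <<< i.toNat   -- 0x1 << i (i ≥ 0 in the range)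
      let ith_bit_value := PySem.Int.band value bit_pattern_with_ith_bit_as_1
      if ith_bit_value ≠ 0 then subset_str ++ [cs.getD i.toNat default] else subset_str) []

-- ===== PORT B =====
-- Source B's while-loop: `while masked: rest = masked & (masked-1); low = masked - rest;
-- chars.append(str_parameter[low.bit_length()-1]); masked = rest`.  masked ≥ 0 always
-- (it is value & (2^n - 1)), so the loop state is carried as a Nat.
def goAlt (m : Nat) (cs : List Char) : List Char :=
  if h : m = 0 then []
  else
    let rest := m &&& (m - 1)          -- masked with its lowest set bit cleared
    let low := m - rest                -- the lowest set bit
    cs.getD (PySem.Int.bitLength (low : Int) - 1) default :: goAlt rest cs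
termination_by m
decreasing_by
  have h1 : m &&& (m - 1) ≤ m - 1 := Nat.and_le_right
  omega

def generate_one_subset_from_bit_pattern_alt (value : Int) (str_parameter : String) : String :=
  let n : Int := min 32 (PySem.Str.len str_parameter)
  let masked : Int := PySem.Int.band value ((1 <<< n.toNat) - 1)  -- value & ((1 << n) - 1) ≥ 0
  String.ofList (goAlt masked.toNat str_parameter.toList)             -- ''.join(chars)

-- ===== PRECONDITION & SPEC =====
def Spec_generate_one_subset_from_bit_pattern (value : Int) (str_parameter : String) (out : String) : Prop := out = generate_one_subset_from_bit_pattern_alt value str_parameter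
instance (value : Int) (str_parameter : String) (out : String) : Decidable (Spec_generate_one_subset_from_bit_pattern value str_parameter out) := by unfold Spec_generate_one_subset_from_bit_pattern; infer_instance

-- ===== CLAIM (what is proved, stated in full; the proofs are below) =====
def Claim_equal_generate_one_subset_from_bit_pattern : Prop := ∀ (value : Int) (str_parameter : String), Dom_generate_one_subset_from_bit_pattern value str_parameter → Spec_generate_one_subset_from_bit_pattern value str_parameter (generate_one_subset_from_bit_pattern value str_parameter)

-- ===== LEMMAS AND PROOFS =====

-- Reference selection: the chars of cs whose position is a set bit of m, low bit first.
def selSpec : Nat → List Char → List Char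
  | _, [] => []
  | m, c :: t => (if m % 2 = 1 then [c] else []) ++ selSpec (m / 2) t

lemma selSpec_zero (cs : List Char) : selSpec 0 cs = [] := by
  induction cs <;> simp [selSpec, *]

-- parity of a Nat AND
lemma and_mod_two (a b : Nat) : (a &&& b) % 2 = if a % 2 = 1 ∧ b % 2 = 1 then 1 else 0 := by
  have h := Nat.testBit_and a b 0
  simp only [Nat.testBit_zero] at h
  by_cases ha : a % 2 = 1 <;> by_cases hb : b % 2 = 1 <;>
    simp only [ha, hb, decide_true, decide_false, Bool.and_true, Bool.and_false,
      Bool.and_self, decide_eq_true_eq, decide_eq_false_iff_not, and_true, and_false,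
      if_pos, if_neg, not_false_eq_true] at h ⊢ <;>
    omega

-- halving identity for Nat AND
lemma and_half (a b : Nat) :
    a &&& b = 2 * (a / 2 &&& b / 2) + (if a % 2 = 1 ∧ b % 2 = 1 then 1 else 0) := by
  have h1 : (a &&& b) / 2 = a / 2 &&& b / 2 := Nat.and_div_two
  have h2 := and_mod_two a b
  by_cases hc : a % 2 = 1 ∧ b % 2 = 1 <;> simp only [hc, if_neg, not_false_eq_true] at h2 ⊢ <;> omega

lemma and_pred_odd (m : Nat) (hm : m % 2 = 1) : m &&& (m - 1) = m - 1 := by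
  have h := and_half m (m - 1)
  have h1 : ¬ (m % 2 = 1 ∧ (m - 1) % 2 = 1) := by omega
  have h2 : (m - 1) / 2 = m / 2 := by omega
  rw [if_neg h1, h2, Nat.and_self] at h
  omega

lemma and_pred_even (k : Nat) (_hk : k ≠ 0) : (2 * k) &&& (2 * k - 1) = 2 * (k &&& (k - 1)) := by
  have h := and_half (2 * k) (2 * k - 1)
  have h1 : ¬ ((2 * k) % 2 = 1 ∧ (2 * k - 1) % 2 = 1) := by omega
  have h2 : (2 * k) / 2 = k := by omega
  have h3 : (2 * k - 1) / 2 = k - 1 := by omega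
  rw [if_neg h1, h2, h3] at h
  omega

-- the masked value is < 2^k
lemma mask_lt (v : Int) (k : Nat) : (PySem.Int.band v ((2 ^ k - 1 : Nat) : Int)).toNat < 2 ^ k := by
  have hp1 : (1 : Nat) ≤ 2 ^ k := Nat.one_le_two_pow
  by_cases hv : 0 ≤ v
  · rw [PySem.Int.band_of_nonneg hv (Int.natCast_nonneg _)]
    simp only [Int.toNat_natCast]
    have := Nat.and_le_right (n := v.toNat) (m := 2 ^ k - 1)
    omega
  · simp only [PySem.Int.band, if_neg hv, if_pos (Int.natCast_nonneg (2 ^ k - 1))]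
    simp only [Int.toNat_natCast]
    omega

-- one more low bit on the mask adds 2^k exactly when bit k of value is set
lemma mask_step (v : Int) (k : Nat) :
    (PySem.Int.band v ((2 ^ (k + 1) - 1 : Nat) : Int)).toNat
      = (PySem.Int.band v ((2 ^ k - 1 : Nat) : Int)).toNat
        + (if PySem.Int.band v ((2 ^ k : Nat) : Int) = 0 then 0 else 2 ^ k) := by
  have hp1 : (1 : Nat) ≤ 2 ^ k := Nat.one_le_two_pow
  have hsucc : (2 : Nat) ^ (k + 1) = 2 ^ k * 2 := by rw [pow_succ]
  by_cases hv : 0 ≤ v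
  · rw [PySem.Int.band_of_nonneg hv (Int.natCast_nonneg _),
        PySem.Int.band_of_nonneg hv (Int.natCast_nonneg _),
        PySem.Int.band_of_nonneg hv (Int.natCast_nonneg _)]
    set n := v.toNat with hn
    simp only [Int.toNat_natCast, Nat.cast_eq_zero]
    rw [Nat.and_two_pow_sub_one_eq_mod, Nat.and_two_pow_sub_one_eq_mod]
    have hand : n &&& 2 ^ k = (n.testBit k).toNat * 2 ^ k := Nat.and_two_pow n k
    have hb : n.testBit k = decide (n / 2 ^ k % 2 = 1) := Nat.testBit_eq_decide_div_mod_eq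
    have hmm : n % (2 ^ k * 2) = n % 2 ^ k + 2 ^ k * (n / 2 ^ k % 2) := Nat.mod_mul
    rcases (by omega : n / 2 ^ k % 2 = 0 ∨ n / 2 ^ k % 2 = 1) with h | h
    · have hf : n.testBit k = false := by rw [hb, h]; simp
      have hc : n &&& 2 ^ k = 0 := by rw [hand, hf]; simp
      rw [if_pos hc, hsucc, hmm, h]
      omega
    · have ht : n.testBit k = true := by rw [hb, h]; simp
      have hc : ¬ (n &&& 2 ^ k = 0) := by rw [hand, ht]; simp
      rw [if_neg hc, hsucc, hmm, h]
      omega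
  · set w := (-v - 1).toNat with hw
    have hband : ∀ b : Nat, PySem.Int.band v ((b : Nat) : Int) = ((b - (b &&& w) : Nat) : Int) := by
      intro b
      simp [PySem.Int.band, hv, ← hw]
    rw [hband, hband, hband]
    simp only [Int.toNat_natCast, Nat.cast_eq_zero]
    rw [Nat.and_comm (2 ^ (k+1) - 1) w, Nat.and_comm (2 ^ k - 1) w, Nat.and_comm (2 ^ k) w,
        Nat.and_two_pow_sub_one_eq_mod, Nat.and_two_pow_sub_one_eq_mod]
    have hand : w &&& 2 ^ k = (w.testBit k).toNat * 2 ^ k := Nat.and_two_pow w k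
    have hb : w.testBit k = decide (w / 2 ^ k % 2 = 1) := Nat.testBit_eq_decide_div_mod_eq
    have hmm : w % (2 ^ k * 2) = w % 2 ^ k + 2 ^ k * (w / 2 ^ k % 2) := Nat.mod_mul
    have hlt : w % 2 ^ k < 2 ^ k := Nat.mod_lt _ (by omega)
    rcases (by omega : w / 2 ^ k % 2 = 0 ∨ w / 2 ^ k % 2 = 1) with h | h
    · have hf : w.testBit k = false := by rw [hb, h]; simp
      have hc : ¬ (2 ^ k - (w &&& 2 ^ k) = 0) := by rw [hand, hf]; simp
      rw [if_neg hc, hsucc, hmm, h]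
      omega
    · have ht : w.testBit k = true := by rw [hb, h]; simp
      have hc : 2 ^ k - (w &&& 2 ^ k) = 0 := by rw [hand, ht]; simp
      rw [if_pos hc, hsucc, hmm, h]
      omega

-- adding bit n on top of an n-bit value appends the n-th char
lemma sel_top : ∀ (n M : Nat) (cs : List Char) (b : Bool), M < 2 ^ n → n < cs.length →
    selSpec (M + (if b then 2 ^ n else 0)) cs
      = selSpec M cs ++ (if b then [cs.getD n default] else []) := by
  intro n
  induction n with
  | zero =>
    intro M cs b hM hn
    interval_cases M
    match cs with
    | c :: t => cases b <;> simp [selSpec, selSpec_zero]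

  | succ n ih =>
    intro M cs b hM hn
    match cs with
    | c :: t =>
      have hsucc : (2 : Nat) ^ (n + 1) = 2 ^ n * 2 := by rw [pow_succ]
      have hmod : (M + (if b then 2 ^ (n+1) else 0)) % 2 = M % 2 := by
        cases b with
        | false => simp
        | true => simp only [if_pos, hsucc]; omega
      have hdiv : (M + (if b then 2 ^ (n+1) else 0)) / 2 = M / 2 + (if b then 2 ^ n else 0) := by
        cases b with
        | false => simp
        | true => simp only [if_pos, hsucc]; omega
      simp only [selSpec, hmod, hdiv]
      have ht : n < t.length := by simpa using hn
      rw [ih (M / 2) t b (by omega) ht]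
      simp [List.append_assoc]

-- A's filtered position scan equals selSpec of the masked value
lemma scan_eq_sel (v : Int) : ∀ (n : Nat) (cs : List Char), n ≤ cs.length →
    ((List.range n).filter (fun k : Nat => decide (PySem.Int.band v ((2 ^ k : Nat) : Int) ≠ 0))).map
        (fun k => cs.getD k default)
      = selSpec ((PySem.Int.band v ((2 ^ n - 1 : Nat) : Int)).toNat) cs := by
  intro n
  induction n with
  | zero =>
    intro cs _
    norm_num [PySem.Int.band_zero, selSpec_zero]
  | succ n ih =>
    intro cs hn
    rw [List.range_succ, List.filter_append, List.map_append, ih cs (by omega)]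
    rw [mask_step v n]
    by_cases hb : PySem.Int.band v ((2 ^ n : Nat) : Int) = 0
    · rw [if_pos hb]
      simp only [List.filter_cons, List.filter_nil, hb, Nat.add_zero]
      norm_num
    · rw [if_neg hb]
      simp only [List.filter_cons, List.filter_nil, ne_eq, hb, not_false_eq_true,
        decide_true, if_true, List.map_cons, List.map_nil]
      have h := sel_top n ((PySem.Int.band v ((2 ^ n - 1 : Nat) : Int)).toNat) cs true
        (mask_lt v n) (by omega)
      simp only [if_pos] at h
      exact h.symm

-- bitLength of a positive Nat is positive
lemma bitLength_pos (m : Nat) (hm : m ≠ 0) : 1 ≤ PySem.Int.bitLength (m : Int) := by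
  by_contra h
  have h0 : PySem.Int.bitLength (m : Int) = 0 := by omega
  have := PySem.Int.lt_two_pow_bitLength (m : Int)
  rw [h0] at this
  simp at this
  omega

-- one lowest-set-bit extraction step, in selSpec terms
lemma sel_step : ∀ (M : Nat), ∀ (cs : List Char), M ≠ 0 → M < 2 ^ cs.length →
    selSpec M cs
      = cs.getD (PySem.Int.bitLength ((M - (M &&& (M - 1)) : Nat) : Int) - 1) default
          :: selSpec (M &&& (M - 1)) cs := by
  intro M
  induction M using Nat.strong_induction_on with
  | _ M ih =>
    intro cs hM hlt
    match cs with
    | [] => simp at hlt; omega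
    | c :: t =>
      rcases Nat.even_or_odd M with he | ho
      · -- M even: M = 2k, recurse on k over the tail
        obtain ⟨k, hk⟩ : ∃ k, M = 2 * k := by
          rcases he with ⟨k, hk⟩; exact ⟨k, by omega⟩
        have hk0 : k ≠ 0 := by omega
        have hand : M &&& (M - 1) = 2 * (k &&& (k - 1)) := by
          rw [hk]; exact and_pred_even k hk0
        set r := k &&& (k - 1) with hr
        have hrk : r ≤ k - 1 := Nat.and_le_right
        have hlow : M - (M &&& (M - 1)) = 2 * (k - r) := by omega
        have hkr0 : k - r ≠ 0 := by omega
        have hbl : PySem.Int.bitLength ((2 * (k - r) : Nat) : Int)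
            = PySem.Int.bitLength ((k - r : Nat) : Int) + 1 := by
          rw [PySem.Int.bitLength_natCast (by omega)]
          congr 2
          omega
        have hblpos := bitLength_pos (k - r) hkr0
        have htlen : k < 2 ^ t.length := by
          simp [List.length_cons, pow_succ] at hlt
          omega
        have hih := ih k (by omega) t hk0 htlen
        -- evaluate both selSpecs one char deep
        have hMe : M % 2 = 0 := by omega
        have hMd : M / 2 = k := by omega
        have hre : (2 * r) % 2 = 0 := by omega
        have hrd : (2 * r) / 2 = r := by omega
        rw [hlow, hbl]
        simp only [selSpec, hMe, hMd, hand, hre, hrd]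
        have hidx : PySem.Int.bitLength ((k - r : Nat) : Int) + 1 - 1
            = (PySem.Int.bitLength ((k - r : Nat) : Int) - 1) + 1 := by omega
        rw [hidx]
        simp only [List.getD_cons_succ]
        rw [hih]
        rfl
      · -- M odd: lowest set bit is bit 0, the head char
        have hm2 : M % 2 = 1 := Nat.odd_iff.mp ho
        have hand : M &&& (M - 1) = M - 1 := and_pred_odd M hm2
        have hlow : M - (M &&& (M - 1)) = 1 := by omega
        have hbl : PySem.Int.bitLength ((1 : Nat) : Int) = 1 := by decide
        have h1 : (M - 1) % 2 = 0 := by omega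
        have h2 : (M - 1) / 2 = M / 2 := by omega
        rw [hlow, hbl]
        simp only [selSpec, hm2, hand, h1, h2]
        simp

-- B's lowest-set-bit loop equals selSpec
lemma goAlt_eq_sel : ∀ (M : Nat) (cs : List Char), M < 2 ^ cs.length → goAlt M cs = selSpec M cs := by
  intro M
  induction M using Nat.strong_induction_on with
  | _ M ih =>
    intro cs hM
    by_cases h0 : M = 0
    · subst h0; rw [goAlt]; simp [selSpec_zero]
    · rw [goAlt]
      simp only [h0, dite_false]
      have hrest : M &&& (M - 1) ≤ M - 1 := Nat.and_le_right
      rw [ih (M &&& (M - 1)) (by omega) cs (by omega)]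
      exact (sel_step M cs h0 hM).symm

-- the two ports compute the same character list
lemma ports_agree (value : Int) (s : String) :
    generate_one_subset_from_bit_pattern value s = generate_one_subset_from_bit_pattern_alt value s := by
  unfold generate_one_subset_from_bit_pattern generate_one_subset_from_bit_pattern_alt
  simp only [PySem.Str.len_eq]
  set cs := s.toList with hcs
  set nI : Int := min 32 ((cs.length : Int)) with hnI
  have hn0 : 0 ≤ nI := by omega
  have hle : nI.toNat ≤ cs.length := by omega
  congr 1
  rw [PySem.List.pyRange_one, List.foldl_map, show nI - 0 = nI from by ring]
  simp only [zero_add, Int.toNat_natCast, Nat.one_shiftLeft]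
  rw [PySem.List.foldl_append_ite
        (p := fun k : Nat => PySem.Int.band value ((2 ^ k : Nat) : Int) ≠ 0)
        (f := fun k : Nat => cs.getD k default) (List.range nI.toNat) []]
  rw [List.nil_append, scan_eq_sel value nI.toNat cs hle]
  have hmask : ((((2 ^ nI.toNat : Nat)) : Int) - 1) = (((2 ^ nI.toNat - 1 : Nat)) : Int) := by
    have := Nat.one_le_two_pow (n := nI.toNat)
    omega
  rw [hmask]
  exact (goAlt_eq_sel _ cs (lt_of_lt_of_le (mask_lt value nI.toNat)
    (Nat.pow_le_pow_right (by omega) hle))).symm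

-- ===== VERDICT (by name: the statement is the Claim_ definition above) =====
theorem generate_one_subset_from_bit_pattern_spec : Claim_equal_generate_one_subset_from_bit_pattern := by
  intro value s _
  exact ports_agree value s
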